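-- pv_equiv track=rewrite | github.com/ztang99/STR-detection-genotyping | STR_detection_pipeline/python_scripts/wdl_build_STR_db.py | process_optional_fields
-- ===== SOURCE A (Python) =====
-- def process_optional_fields(optional_fields):
--     """
--     Extracts the sample name from optional fields of a SAM file.
--
--     Parameters:
--     - optional_fields (list): List of optional field strings from a SAM file.
--     Returns:
--     - sample_name (str): The extracted sample name or None if not found.
--     """
--     sample_name = None
--     secondAlign = False
--     for field in optional_fields:
--         if field.startswith("RG:Z:"):
--             sample_name = field.split(":")[-1]
--             sample_name = sample_name.split("-")[-1]
--         if field.startswith("SA:Z:"):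
--             secondAlign = True
--     return sample_name, secondAlign
-- ===== SOURCE B (Python) =====
-- def process_optional_fields(optional_fields):
--     """Scan backwards and stop at the first RG:Z: field (the last match in
--     forward order); separately short-circuit on the first SA:Z: field."""
--     sample_name = None
--     for field in reversed(optional_fields):
--         if field.startswith("RG:Z:"):
--             sample_name = field.split(":")[-1].split("-")[-1]
--             break
--     secondAlign = False
--     for field in optional_fields:
--         if field.startswith("SA:Z:"):
--             secondAlign = True
--             break
--     return sample_name, secondAlign
-- ===== Notes on version B (the rewrite author's own statement) =====
-- stated objective: alternative
-- what changed: Instead of A's single forward fold that keeps overwriting two accumulators over the whole list, B scans backwards and terminates at the first RG:Z: field (last-match = first-from-the-right) and separately short-circuits on the first SA:Z: field, so neither loop needs mutable state carried to the end.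
import Mathlib
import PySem

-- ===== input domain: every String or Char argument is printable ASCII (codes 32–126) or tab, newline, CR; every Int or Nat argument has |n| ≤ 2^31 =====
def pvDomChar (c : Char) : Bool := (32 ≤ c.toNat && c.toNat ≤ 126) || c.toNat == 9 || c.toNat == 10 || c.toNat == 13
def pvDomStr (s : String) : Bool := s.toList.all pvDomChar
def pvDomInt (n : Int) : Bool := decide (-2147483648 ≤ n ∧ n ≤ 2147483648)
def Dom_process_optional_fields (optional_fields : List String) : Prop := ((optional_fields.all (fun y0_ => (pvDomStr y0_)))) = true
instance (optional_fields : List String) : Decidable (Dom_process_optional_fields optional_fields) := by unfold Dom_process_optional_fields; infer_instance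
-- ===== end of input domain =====

-- B replaces A's single forward fold over two accumulators with a backward scan that
-- stops at the first RG:Z: field and a separate short-circuit scan for SA:Z:; same O(n) cost.

-- ===== PORT A =====
def process_optional_fields (optional_fields : List String) : Option String × Bool :=
  optional_fields.foldl
    (fun st field =>
      let st :=
        if PySem.Str.startswith field "RG:Z:" then
          let sample_name := PySem.List.pyGetD (((PySem.Str.split? field ":").getD [])) (-1) ""
          let sample_name := PySem.List.pyGetD (((PySem.Str.split? sample_name "-").getD [])) (-1) ""
          (some sample_name, st.2)
        else st
      if PySem.Str.startswith field "SA:Z:" then (st.1, true) else st)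
    (none, false)

-- ===== PORT B =====
-- the 'for … in reversed(...): if …: …; break' loop: first RG match from the right, early exit
def pvBRG : List String → Option String
  | [] => none
  | field :: rest =>
      if PySem.Str.startswith field "RG:Z:" then
        some (PySem.List.pyGetD
          (((PySem.Str.split?
              (PySem.List.pyGetD (((PySem.Str.split? field ":").getD [])) (-1) "") "-").getD [])) (-1) "")
      else pvBRG rest

-- the 'for … in optional_fields: if …: …; break' loop: short-circuit on the first SA match
def pvBSA : List String → Bool
  | [] => false
  | field :: rest => if PySem.Str.startswith field "SA:Z:" then true else pvBSA rest

def process_optional_fields_alt (optional_fields : List String) : Option String × Bool :=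
  (pvBRG optional_fields.reverse, pvBSA optional_fields)

-- ===== PRECONDITION & SPEC =====
def Spec_process_optional_fields (optional_fields : List String) (out : Option String × Bool) : Prop := out = process_optional_fields_alt optional_fields
instance (optional_fields : List String) (out : Option String × Bool) : Decidable (Spec_process_optional_fields optional_fields out) := by unfold Spec_process_optional_fields; infer_instance

-- ===== CLAIM (what is proved, stated in full; the proofs are below) =====
def Claim_equal_process_optional_fields : Prop := ∀ (optional_fields : List String), Dom_process_optional_fields optional_fields → Spec_process_optional_fields optional_fields (process_optional_fields optional_fields)

-- ===== LEMMAS AND PROOFS =====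

-- the double-split extraction both programs apply to an RG field
def pvExt (f : String) : String :=
  PySem.List.pyGetD
    (((PySem.Str.split? (PySem.List.pyGetD (((PySem.Str.split? f ":").getD [])) (-1) "") "-").getD [])) (-1) ""

-- generic shape of A's one-pass fold: last p-match (extracted by e) and OR of q-matches
lemma foldGen {A : Type} (p q : String → Bool) (e : String → A) (xs : List String) :
    ∀ (s : Option A × Bool),
    xs.foldl
      (fun st field =>
        let st := if p field then (some (e field), st.2) else st
        if q field then (st.1, true) else st) s
    = ((xs.reverse.find? p).elim s.1 (fun f => some (e f)), s.2 || xs.any q) := by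
  induction xs with
  | nil => intro s; simp
  | cons x xs ih =>
    intro s
    rw [List.foldl_cons, ih, List.reverse_cons, List.find?_append, List.any_cons]
    by_cases hp : p x <;> by_cases hq : q x <;>
      cases h : xs.reverse.find? p <;>
        simp [hp, hq]

lemma pvBRG_eq (l : List String) :
    pvBRG l = (l.find? (fun f => PySem.Str.startswith f "RG:Z:")).elim none (fun f => some (pvExt f)) := by
  induction l with
  | nil => simp [pvBRG]
  | cons x xs ih =>
    by_cases h : PySem.Str.startswith x "RG:Z:" <;>
      simp only [pvBRG, List.find?_cons, h, ih, pvExt, if_true, if_false,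
        Bool.false_eq_true, Option.elim]

lemma pvBSA_eq (l : List String) :
    pvBSA l = l.any (fun f => PySem.Str.startswith f "SA:Z:") := by
  induction l with
  | nil => simp [pvBSA]
  | cons x xs ih =>
    by_cases h : PySem.Str.startswith x "SA:Z:" <;>
      simp only [pvBSA, List.any_cons, h, ih, if_true, if_false, Bool.false_eq_true,
        ite_false, Bool.true_or, Bool.false_or]

-- ===== VERDICT (by name: the statement is the Claim_ definition above) =====
theorem process_optional_fields_spec : Claim_equal_process_optional_fields := by
  intro xs _
  unfold Spec_process_optional_fields
  have hA : process_optional_fields xs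
      = ((xs.reverse.find? (fun f => PySem.Str.startswith f "RG:Z:")).elim none (fun f => some (pvExt f)),
         false || xs.any (fun f => PySem.Str.startswith f "SA:Z:")) :=
    foldGen (fun f => PySem.Str.startswith f "RG:Z:") (fun f => PySem.Str.startswith f "SA:Z:") pvExt xs (none, false)
  rw [hA]
  unfold process_optional_fields_alt
  rw [pvBRG_eq, pvBSA_eq]
  simp
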